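-- pv_equiv track=rewrite | github.com/Suge8/bao | bao/agent/tools/mcp.py | _normalize_name_fragment
-- ===== SOURCE A (Python) =====
-- def _normalize_name_fragment(value: str, fallback: str) -> str:
--     lowered = value.lower()
--     chars = [ch if (ch.isalnum() or ch == "_") else "_" for ch in lowered]
--     compact = "_".join(part for part in "".join(chars).split("_") if part)
--     if not compact:
--         compact = fallback
--     if compact[0].isdigit():
--         compact = f"n_{compact}"
--     return compact[:32]
-- ===== SOURCE B (Python) =====
-- def _normalize_name_fragment(value: str, fallback: str) -> str:
--     out = []
--     pending = False
--     for ch in value.lower():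
--         if ch.isalnum():
--             if pending and out:
--                 out.append("_")
--             pending = False
--             out.append(ch)
--         else:
--             pending = True
--     core = "".join(out)
--     if not core:
--         core = fallback
--     if core[0].isdigit():
--         core = "n_" + core
--     return core[:32]
-- ===== Notes on version B (the rewrite author's own statement) =====
-- stated objective: alternative
-- what changed: Replaced A's map-then-join-then-split('_')-then-filter-then-join pipeline with a single linear scan over value.lower() that keeps a result buffer and a pending-separator flag, emitting '_' only between words.
import Mathlib
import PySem

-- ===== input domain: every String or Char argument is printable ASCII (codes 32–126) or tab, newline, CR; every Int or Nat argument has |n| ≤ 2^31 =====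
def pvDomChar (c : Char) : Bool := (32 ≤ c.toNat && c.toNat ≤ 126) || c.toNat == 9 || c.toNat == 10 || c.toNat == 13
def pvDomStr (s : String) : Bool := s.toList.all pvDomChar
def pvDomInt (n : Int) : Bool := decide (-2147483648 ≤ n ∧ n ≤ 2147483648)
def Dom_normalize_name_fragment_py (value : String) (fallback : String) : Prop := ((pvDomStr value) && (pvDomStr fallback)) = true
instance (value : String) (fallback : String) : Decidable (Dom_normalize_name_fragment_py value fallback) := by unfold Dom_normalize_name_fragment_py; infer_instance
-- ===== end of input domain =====

-- B replaces A's map/join/split/filter/join pipeline by one linear scan with a pending-separator flag (objective: alternative decomposition, same cost).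

-- ===== PORT A =====
def pvSubA (ch : Char) : Char := if PySem.Chars.isalnum ch || ch == '_' then ch else '_'

def normalize_name_fragment_py (value : String) (fallback : String) : String :=
  let lowered := PySem.Chars.lower value.toList
  let chars := lowered.map pvSubA
  let compact := PySem.Chars.join ['_'] ((PySem.Chars.splitOn chars ['_']).filter (fun part => !part.isEmpty))
  let compact2 := if compact.isEmpty then fallback.toList else compact
  -- compact[0]: Python raises IndexError when compact2 = []; those inputs are outside Pre_
  let compact3 := if PySem.Chars.isdigit ((PySem.List.pyGet? compact2 0).getD ' ') then 'n' :: '_' :: compact2 else compact2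
  String.mk (PySem.List.slice compact3 none (some 32))

-- ===== PORT B =====
def pvStepB (st : List Char × Bool) (ch : Char) : List Char × Bool :=
  if PySem.Chars.isalnum ch then
    ((if st.2 && !st.1.isEmpty then st.1 ++ ['_'] else st.1) ++ [ch], false)
  else
    (st.1, true)

def normalize_name_fragment_py_alt (value : String) (fallback : String) : String :=
  let core := ((PySem.Chars.lower value.toList).foldl pvStepB ([], false)).1
  let core2 := if core.isEmpty then fallback.toList else core
  -- core[0]: B raises IndexError exactly where A does; outside Pre_
  let core3 := if PySem.Chars.isdigit ((PySem.List.pyGet? core2 0).getD ' ') then 'n' :: '_' :: core2 else core2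
  String.mk (PySem.List.slice core3 none (some 32))

-- ===== PRECONDITION & SPEC =====
-- Pre_ excludes exactly the inputs where Python A raises IndexError on compact[0]:
-- value with no alphanumeric character together with an empty fallback.
def Pre_normalize_name_fragment_py (value : String) (fallback : String) : Prop :=
  fallback ≠ "" ∨ value.toList.any PySem.Chars.isalnum = true
instance (value : String) (fallback : String) : Decidable (Pre_normalize_name_fragment_py value fallback) := by
  unfold Pre_normalize_name_fragment_py; infer_instance

def pvWitness_normalize_name_fragment_py : String × String := ("Hello World!", "tool")

def Spec_normalize_name_fragment_py (value : String) (fallback : String) (out : String) : Prop :=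
  out = normalize_name_fragment_py_alt value fallback
instance (value : String) (fallback : String) (out : String) : Decidable (Spec_normalize_name_fragment_py value fallback out) := by
  unfold Spec_normalize_name_fragment_py; infer_instance

-- ===== CLAIM (what is proved, stated in full; the proofs are below) =====
def Claim_equal_normalize_name_fragment_py : Prop := ∀ (value : String) (fallback : String), Dom_normalize_name_fragment_py value fallback → Pre_normalize_name_fragment_py value fallback → Spec_normalize_name_fragment_py value fallback (normalize_name_fragment_py value fallback)

-- ===== LEMMAS AND PROOFS =====
theorem pv_go_spec : ∀ (l : List Char) (fuel : Nat) (cur : List Char) (acc : List (List Char)),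
    l.length ≤ fuel →
    PySem.Chars.splitOn.go ['_'] fuel l cur acc
      = acc.reverse ++ List.modifyHead (cur.reverse ++ ·) (List.splitOnP (fun c => c == '_') l) := by
  intro l
  induction l with
  | nil =>
    intro fuel cur acc _
    cases fuel <;> simp [PySem.Chars.splitOn.go, List.splitOnP_nil]
  | cons c rest ih =>
    intro fuel cur acc hf
    cases fuel with
    | zero => simp at hf
    | succ fuel =>
      rw [PySem.Chars.splitOn.go]
      by_cases hc : c = '_'
      · subst hc
        have hpre : List.isPrefixOf ['_'] ('_' :: rest) = true := by simp [List.isPrefixOf]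
        rw [if_pos hpre]
        simp only [List.length_cons] at hf
        simp only [List.length_cons, List.length_nil, List.drop_succ_cons, List.drop_zero]
        rw [ih fuel [] (cur.reverse :: acc) (by omega)]
        simp only [List.splitOnP_cons]
        have h1 : ('_' == '_') = true := by decide
        rw [h1]
        simp
        cases List.splitOnP (fun c => c == '_') rest <;> simp
      · have hpre : List.isPrefixOf ['_'] (c :: rest) = false := by
          simp [List.isPrefixOf]; exact fun h => absurd h.symm hc
        rw [if_neg (by simp [hpre])]
        simp only [List.length_cons] at hf
        rw [ih fuel (c :: cur) acc (by omega)]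
        simp only [List.splitOnP_cons]
        have : (c == '_') = false := by simp [hc]
        rw [this]
        simp only [Bool.false_eq_true, if_false, List.modifyHead_modifyHead]
        have h3 : (fun x => (c :: cur).reverse ++ x) = ((fun x => cur.reverse ++ x) ∘ List.cons c) := by
          funext x; simp
        rw [h3]

theorem pv_splitOn_eq (l : List Char) :
    PySem.Chars.splitOn l ['_'] = List.splitOnP (fun c => c == '_') l := by
  unfold PySem.Chars.splitOn
  rw [pv_go_spec l (l.length + 1) [] [] (by omega)]
  simp
  cases List.splitOnP (fun c => c == '_') l <;> simp

def pvFlt (l : List (List Char)) : List (List Char) := l.filter (fun part => !part.isEmpty)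
def pvSep (t : List (List Char)) : List Char :=
  if pvFlt t = [] then [] else '_' :: PySem.Chars.join ['_'] (pvFlt t)
def pvParts (cs : List Char) : List (List Char) :=
  List.splitOnP (fun c => c == '_') (cs.map pvSubA)
def pvAcore (cs : List Char) : List Char :=
  PySem.Chars.join ['_'] (pvFlt (pvParts cs))
def pvLead (cs : List Char) : Bool :=
  match cs with
  | [] => false
  | d :: _ => !PySem.Chars.isalnum d

theorem pvSubA_sep (c : Char) : (pvSubA c == '_') = !PySem.Chars.isalnum c := by
  by_cases h : PySem.Chars.isalnum c = true
  · have hne : c ≠ '_' := by intro he; subst he; exact absurd h (by decide)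
    simp [pvSubA, h, hne]
  · simp at h
    simp [pvSubA, h]

theorem pvSubA_of_alnum {c : Char} (h : PySem.Chars.isalnum c = true) : pvSubA c = c := by
  simp [pvSubA, h]

theorem pvJf_cons_nil (t : List (List Char)) :
    PySem.Chars.join ['_'] (pvFlt ([] :: t)) = PySem.Chars.join ['_'] (pvFlt t) := by
  simp [pvFlt]

theorem pvJf_cons {a : List Char} (ha : a ≠ []) (t : List (List Char)) :
    PySem.Chars.join ['_'] (pvFlt (a :: t)) = a ++ pvSep t := by
  have : pvFlt (a :: t) = a :: pvFlt t := by simp [pvFlt, ha]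
  rw [this, pvSep]
  cases h : pvFlt t with
  | nil => simp [PySem.Chars.join, List.intercalate]
  | cons x xs => simp [PySem.Chars.join, List.intercalate]

theorem pvJf_eq_nil (t : List (List Char)) :
    PySem.Chars.join ['_'] (pvFlt t) = [] ↔ pvFlt t = [] := by
  constructor
  · intro h
    cases hf : pvFlt t with
    | nil => rfl
    | cons x xs =>
      have hmem : x ∈ pvFlt t := by rw [hf]; exact List.mem_cons_self
      have hx : x ≠ [] := by
        have h2 : x ∈ t ∧ ¬ x = [] := by simpa [pvFlt] using hmem
        exact h2.2
      rw [hf] at h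
      cases xs with
      | nil => simp [PySem.Chars.join, List.intercalate] at h; exact absurd h hx
      | cons y ys => simp [PySem.Chars.join, List.intercalate] at h
  · intro h; simp [h, PySem.Chars.join, List.intercalate]

theorem pvParts_nil : pvParts [] = [[]] := by simp [pvParts, List.splitOnP_nil]

theorem pvParts_cons_not {c : Char} (cs : List Char) (h : PySem.Chars.isalnum c = false) :
    pvParts (c :: cs) = [] :: pvParts cs := by
  simp only [pvParts, List.map_cons, List.splitOnP_cons, pvSubA_sep, h]
  simp

theorem pvParts_cons_alnum {c : Char} (cs : List Char) (h : PySem.Chars.isalnum c = true) :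
    pvParts (c :: cs) = List.modifyHead (List.cons c) (pvParts cs) := by
  simp only [pvParts, List.map_cons, List.splitOnP_cons, pvSubA_of_alnum h]
  simp
  intro he
  exfalso; subst he; exact absurd h (by decide)

theorem pvAcore_nil : pvAcore [] = [] := by
  simp [pvAcore, pvParts_nil, pvFlt, PySem.Chars.join, List.intercalate]

theorem pvAcore_not {c : Char} (cs : List Char) (h : PySem.Chars.isalnum c = false) :
    pvAcore (c :: cs) = pvAcore cs := by
  rw [pvAcore, pvParts_cons_not cs h, pvJf_cons_nil]; rfl

theorem pvHeadEq (cs : List Char) (h : List Char) (t : List (List Char))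
    (hp : pvParts cs = h :: t) :
    h ++ pvSep t = if pvAcore cs = [] then [] else if pvLead cs then '_' :: pvAcore cs else pvAcore cs := by
  cases cs with
  | nil =>
    rw [pvParts_nil] at hp
    cases hp
    simp [pvAcore_nil, pvSep, pvFlt]
  | cons d ds =>
    by_cases hd : PySem.Chars.isalnum d = true
    · obtain ⟨h', t', hp'⟩ : ∃ h' t', pvParts ds = h' :: t' := by
        cases hq : pvParts ds with
        | nil => exact absurd hq (List.splitOnP_ne_nil _ _)
        | cons a b => exact ⟨a, b, rfl⟩
      rw [pvParts_cons_alnum ds hd, hp'] at hp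
      simp at hp
      obtain ⟨rfl, rfl⟩ := hp
      have hcore : pvAcore (d :: ds) = (d :: h') ++ pvSep t' := by
        rw [pvAcore, pvParts_cons_alnum ds hd, hp']
        exact pvJf_cons (by simp) t'
      rw [hcore]
      simp [pvLead, hd]
    · have hd' : PySem.Chars.isalnum d = false := by simpa using hd
      rw [pvParts_cons_not ds hd'] at hp
      simp at hp
      obtain ⟨rfl, rfl⟩ := hp
      rw [pvAcore_not ds hd']
      have : pvAcore ds = PySem.Chars.join ['_'] (pvFlt (pvParts ds)) := rfl
      simp only [pvLead, hd', List.nil_append, pvSep, Bool.not_false, if_true]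
      by_cases hn : pvFlt (pvParts ds) = []
      · rw [if_pos hn, if_pos (by rw [this, (pvJf_eq_nil _).2 hn])]
      · rw [if_neg hn, if_neg (by rw [this]; exact fun hh => hn ((pvJf_eq_nil _).1 hh))]
        rfl


theorem pv_main (cs : List Char) : ∀ (out : List Char) (p : Bool),
    (cs.foldl pvStepB (out, p)).1 =
      if pvAcore cs = [] then out
      else if out = [] then pvAcore cs
      else if p || pvLead cs then out ++ '_' :: pvAcore cs
      else out ++ pvAcore cs := by
  induction cs with
  | nil => intro out p; simp [pvAcore_nil]
  | cons c cs ih =>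
    intro out p
    by_cases hc : PySem.Chars.isalnum c = true
    · -- alnum step
      obtain ⟨h', t', hp'⟩ : ∃ h' t', pvParts cs = h' :: t' := by
        cases hq : pvParts cs with
        | nil => exact absurd hq (List.splitOnP_ne_nil _ _)
        | cons a b => exact ⟨a, b, rfl⟩
      have hcore : pvAcore (c :: cs) = c :: (h' ++ pvSep t') := by
        rw [pvAcore, pvParts_cons_alnum cs hc, hp', List.modifyHead_cons]
        rw [pvJf_cons (by simp) t']
        rfl
      have hX := pvHeadEq cs h' t' hp'
      set X : List Char := if pvAcore cs = [] then [] else if pvLead cs then '_' :: pvAcore cs else pvAcore cs with hXdef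
      have hfold : List.foldl pvStepB (out, p) (c :: cs)
          = List.foldl pvStepB ((if p && !out.isEmpty then out ++ ['_'] else out) ++ [c], false) cs := by
        simp [pvStepB, hc]
      rw [hfold, ih]
      have hIH : (if pvAcore cs = [] then (if p && !out.isEmpty then out ++ ['_'] else out) ++ [c]
          else if (if p && !out.isEmpty then out ++ ['_'] else out) ++ [c] = [] then pvAcore cs
          else if false || pvLead cs then ((if p && !out.isEmpty then out ++ ['_'] else out) ++ [c]) ++ '_' :: pvAcore cs
          else ((if p && !out.isEmpty then out ++ ['_'] else out) ++ [c]) ++ pvAcore cs)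
          = (if p && !out.isEmpty then out ++ ['_'] else out) ++ [c] ++ X := by
        by_cases h0 : pvAcore cs = []
        · simp [h0, hXdef]
        · by_cases hl : pvLead cs = true <;> simp [h0, hl, hXdef]
      rw [hIH, hcore, hX]
      have hlead : pvLead (c :: cs) = false := by simp [pvLead, hc]
      rw [hlead]
      rw [if_neg (by simp : ¬ (c :: X) = [])]
      by_cases ho : out = []
      · subst ho; simp
      · have hne : out.isEmpty = false := by simpa using ho
        rw [if_neg ho]
        cases p <;> simp [hne]
    · have hc' : PySem.Chars.isalnum c = false := by simpa using hc
      have hfold : List.foldl pvStepB (out, p) (c :: cs) = List.foldl pvStepB (out, true) cs := by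
        simp [pvStepB, hc']
      rw [hfold, ih, pvAcore_not cs hc']
      simp only [pvLead, hc', Bool.not_false, Bool.or_true, Bool.true_or]

-- ===== VERDICT (by name: the statement is the Claim_ definition above) =====
theorem normalize_name_fragment_py_spec : Claim_equal_normalize_name_fragment_py := by
  unfold Claim_equal_normalize_name_fragment_py
  intro value fallback _ _
  unfold Spec_normalize_name_fragment_py
  have hcore : ((PySem.Chars.lower value.toList).foldl pvStepB ([], false)).1
      = pvAcore (PySem.Chars.lower value.toList) := by
    rw [pv_main]
    by_cases h : pvAcore (PySem.Chars.lower value.toList) = [] <;> simp [h]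
  have hA : PySem.Chars.join ['_']
        ((PySem.Chars.splitOn ((PySem.Chars.lower value.toList).map pvSubA) ['_']).filter
          (fun part => !part.isEmpty))
      = pvAcore (PySem.Chars.lower value.toList) := by
    rw [pv_splitOn_eq]; rfl
  simp only [normalize_name_fragment_py, normalize_name_fragment_py_alt]
  rw [hA, hcore]
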